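-- pv_equiv track=rewrite | github.com/arvind035/Assignment | DSA/Assignment-6.py | reconstructPermutation
-- ===== SOURCE A (Python) =====
-- def reconstructPermutation(s):
--     n = len(s)
--     perm = []
--     low, high = 0, n
--
--     for ch in s:
--         if ch == 'I':
--             perm.append(low)
--             low += 1
--         else:
--             perm.append(high)
--             high -= 1
--
--     perm.append(low)
--
--     return perm
-- ===== SOURCE B (Python) =====
-- def reconstructPermutation(s):
--     # Two sequential passes instead of one interleaved loop:
--     # pass 1 fills the 'I' slots (and the final slot) with an ascending counter,
--     # leaving None placeholders; pass 2 replaces placeholders with a descending counter.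
--     marked = []
--     inc = 0
--     for ch in s:
--         if ch == 'I':
--             marked.append(inc)
--             inc += 1
--         else:
--             marked.append(None)
--     marked.append(inc)
--     out = []
--     dec = len(s)
--     for v in marked:
--         if v is None:
--             out.append(dec)
--             dec -= 1
--         else:
--             out.append(v)
--     return out
-- ===== Notes on version B (the rewrite author's own statement) =====
-- stated objective: alternative
-- what changed: Replaces A's single interleaved loop maintaining low and high counters simultaneously with two sequential passes: the first fills ascending values into 'I' slots (None elsewhere, final slot ascending), the second fills the placeholders with a descending counter.
import Mathlib
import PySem

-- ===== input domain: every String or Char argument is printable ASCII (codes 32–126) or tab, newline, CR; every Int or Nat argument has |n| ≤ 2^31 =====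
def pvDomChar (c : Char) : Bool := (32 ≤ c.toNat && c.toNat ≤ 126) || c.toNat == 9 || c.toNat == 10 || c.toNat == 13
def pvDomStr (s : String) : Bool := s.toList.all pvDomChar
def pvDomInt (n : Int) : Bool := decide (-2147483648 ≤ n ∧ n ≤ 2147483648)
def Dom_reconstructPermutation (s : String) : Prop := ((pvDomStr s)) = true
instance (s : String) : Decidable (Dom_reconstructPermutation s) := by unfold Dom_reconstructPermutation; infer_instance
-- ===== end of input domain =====

-- B replaces A's single interleaved loop (two live counters) with two sequential
-- passes over the sequence (ascending fill of 'I' slots, then descending fill of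
-- the placeholders); same cost, different decomposition ("alternative").

-- ===== PORT A =====
-- single loop over s with state (perm, low, high), then one final append of low
def reconstructPermutation (s : String) : List Int :=
  let n : Int := (s.toList.length : Int)
  let st := s.toList.foldl
    (fun (st : List Int × Int × Int) ch =>
      if ch = 'I' then (st.1 ++ [st.2.1], st.2.1 + 1, st.2.2)
      else (st.1 ++ [st.2.2], st.2.1, st.2.2 - 1))
    ([], 0, n)
  st.1 ++ [st.2.1]

-- ===== PORT B =====
-- pass 1: ascending counter into 'I' slots, none elsewhere, final slot ascending;
-- pass 2: replace each none with a descending counter starting at len(s)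
def reconstructPermutation_alt (s : String) : List Int :=
  let p1 := s.toList.foldl
    (fun (st : List (Option Int) × Int) ch =>
      if ch = 'I' then (st.1 ++ [some st.2], st.2 + 1)
      else (st.1 ++ [none], st.2))
    ([], 0)
  let marked := p1.1 ++ [some p1.2]
  let p2 := marked.foldl
    (fun (st : List Int × Int) v =>
      match v with
      | none => (st.1 ++ [st.2], st.2 - 1)
      | some x => (st.1 ++ [x], st.2))
    ([], (s.toList.length : Int))
  p2.1

-- ===== PRECONDITION & SPEC =====
def Spec_reconstructPermutation (s : String) (out : List Int) : Prop := out = reconstructPermutation_alt s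
instance (s : String) (out : List Int) : Decidable (Spec_reconstructPermutation s out) := by unfold Spec_reconstructPermutation; infer_instance

-- ===== CLAIM (what is proved, stated in full; the proofs are below) =====
def Claim_equal_reconstructPermutation : Prop := ∀ (s : String), Dom_reconstructPermutation s → Spec_reconstructPermutation s (reconstructPermutation s)

-- ===== LEMMAS AND PROOFS =====

-- cons-style form of A's loop (including the trailing low)
def passA : List Char → Int → Int → List Int
  | [], low, _ => [low]
  | c :: cs, low, high =>
    if c = 'I' then low :: passA cs (low + 1) high
    else high :: passA cs low (high - 1)

-- cons-style form of B's first pass (including the trailing some inc)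
def pass1 : List Char → Int → List (Option Int)
  | [], inc => [some inc]
  | c :: cs, inc =>
    if c = 'I' then some inc :: pass1 cs (inc + 1)
    else none :: pass1 cs inc

-- cons-style form of B's second pass
def pass2 : List (Option Int) → Int → List Int
  | [], _ => []
  | none :: vs, dec => dec :: pass2 vs (dec - 1)
  | some x :: vs, dec => x :: pass2 vs dec

theorem foldA_eq (cs : List Char) : ∀ (acc : List Int) (low high : Int),
    (let st := cs.foldl
       (fun (st : List Int × Int × Int) ch =>
         if ch = 'I' then (st.1 ++ [st.2.1], st.2.1 + 1, st.2.2)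
         else (st.1 ++ [st.2.2], st.2.1, st.2.2 - 1))
       (acc, low, high)
     st.1 ++ [st.2.1]) = acc ++ passA cs low high := by
  induction cs with
  | nil => intro acc low high; simp [passA]
  | cons c cs ih =>
    intro acc low high
    by_cases h : c = 'I' <;> simp [List.foldl, h, passA, ih]

theorem fold1_eq (cs : List Char) : ∀ (acc : List (Option Int)) (inc : Int),
    (let st := cs.foldl
       (fun (st : List (Option Int) × Int) ch =>
         if ch = 'I' then (st.1 ++ [some st.2], st.2 + 1)
         else (st.1 ++ [none], st.2))
       (acc, inc)
     st.1 ++ [some st.2]) = acc ++ pass1 cs inc := by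
  induction cs with
  | nil => intro acc inc; simp [pass1]
  | cons c cs ih =>
    intro acc inc
    by_cases h : c = 'I' <;> simp [List.foldl, h, pass1, ih]

theorem fold2_eq (vs : List (Option Int)) : ∀ (acc : List Int) (dec : Int),
    (vs.foldl
       (fun (st : List Int × Int) v =>
         match v with
         | none => (st.1 ++ [st.2], st.2 - 1)
         | some x => (st.1 ++ [x], st.2))
       (acc, dec)).1 = acc ++ pass2 vs dec := by
  induction vs with
  | nil => intro acc dec; simp [pass2]
  | cons v vs ih =>
    intro acc dec
    cases v <;> simp [List.foldl, pass2, ih]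

theorem pass2_pass1 (cs : List Char) : ∀ (low high : Int),
    pass2 (pass1 cs low) high = passA cs low high := by
  induction cs with
  | nil => intro low high; simp [pass1, pass2, passA]
  | cons c cs ih =>
    intro low high
    by_cases h : c = 'I' <;> simp [pass1, pass2, passA, h, ih]

-- ===== VERDICT (by name: the statement is the Claim_ definition above) =====
theorem reconstructPermutation_spec : Claim_equal_reconstructPermutation := by
  intro s _
  show reconstructPermutation s = reconstructPermutation_alt s
  unfold reconstructPermutation reconstructPermutation_alt
  rw [foldA_eq s.toList [] 0 ((s.toList.length : Int))]
  have h1 := fold1_eq s.toList [] 0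
  simp only at h1 ⊢
  rw [h1]
  simp only [List.nil_append]
  rw [fold2_eq (pass1 s.toList 0) [] ((s.toList.length : Int))]
  simp [pass2_pass1]
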